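-- pv_equiv track=rewrite | github.com/funnydog/AoC2018 | day18/day18.py | resource
-- ===== SOURCE A (Python) =====
-- TREES = "|"
--
-- LUMBER = "#"
--
-- def resource(area):
--     trees = lumber = 0
--     for row in area:
--         for e in row:
--             if e == TREES:
--                 trees += 1
--             elif e == LUMBER:
--                 lumber += 1
--     return trees * lumber
-- ===== SOURCE B (Python) =====
-- TREES = "|"
--
-- LUMBER = "#"
--
-- def resource(area):
--     flat = [e for row in area for e in row]
--     return flat.count(TREES) * flat.count(LUMBER)
-- ===== Notes on version B (the rewrite author's own statement) =====
-- stated objective: simpler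
-- what changed: B flattens the grid once and uses two list.count library scans instead of A's single interleaved pass maintaining two running counters.
import Mathlib
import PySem

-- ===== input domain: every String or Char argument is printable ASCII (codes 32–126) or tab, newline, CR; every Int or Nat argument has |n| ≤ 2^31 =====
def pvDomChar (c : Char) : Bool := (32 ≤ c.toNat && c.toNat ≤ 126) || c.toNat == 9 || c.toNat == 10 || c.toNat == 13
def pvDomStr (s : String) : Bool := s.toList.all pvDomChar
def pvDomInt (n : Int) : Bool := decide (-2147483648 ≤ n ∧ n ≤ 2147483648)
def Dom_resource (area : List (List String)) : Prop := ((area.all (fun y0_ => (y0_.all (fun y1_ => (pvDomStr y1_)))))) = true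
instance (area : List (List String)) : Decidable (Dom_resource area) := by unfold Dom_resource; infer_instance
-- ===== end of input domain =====

-- B flattens the grid once and counts with two library scans instead of A's interleaved counter pass.

-- ===== PORT A =====
def resource (area : List (List String)) : Int :=
  let p := area.foldl (fun (tl : Int × Int) row =>
    row.foldl (fun (tl : Int × Int) e =>
      if e == "|" then (tl.1 + 1, tl.2)
      else if e == "#" then (tl.1, tl.2 + 1)
      else tl) tl) (0, 0)
  p.1 * p.2

-- ===== PORT B =====
def resource_alt (area : List (List String)) : Int :=
  let flat := area.foldl (fun acc row => acc ++ row) []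
  (PySem.List.count flat "|" : Int) * (PySem.List.count flat "#" : Int)

-- ===== PRECONDITION & SPEC =====
def Spec_resource (area : List (List String)) (out : Int) : Prop := out = resource_alt area
instance (area : List (List String)) (out : Int) : Decidable (Spec_resource area out) := by unfold Spec_resource; infer_instance

-- ===== CLAIM (what is proved, stated in full; the proofs are below) =====
def Claim_equal_resource : Prop := ∀ (area : List (List String)), Dom_resource area → Spec_resource area (resource area)

-- ===== LEMMAS AND PROOFS =====

theorem resource_row_foldl (row : List String) (t l : Int) :
    row.foldl (fun (tl : Int × Int) e =>
      if e == "|" then (tl.1 + 1, tl.2)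
      else if e == "#" then (tl.1, tl.2 + 1)
      else tl) (t, l) = (t + (row.count "|" : Int), l + (row.count "#" : Int)) := by
  induction row generalizing t l with
  | nil => simp
  | cons x xs ih =>
    simp only [List.foldl_cons]
    split_ifs with h1 h2
    · rw [beq_iff_eq] at h1
      subst h1
      rw [ih]
      simp [Prod.ext_iff]
      ring
    · rw [beq_iff_eq] at h2
      subst h2
      rw [ih]
      simp [Prod.ext_iff]
      ring
    · rw [ih]
      simp [List.count_cons, h1, h2]

theorem flat_acc (l : List (List String)) (a : List String) :
    l.foldl (fun acc row => acc ++ row) a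
      = a ++ l.foldl (fun acc row => acc ++ row) [] := by
  induction l generalizing a with
  | nil => simp
  | cons r rs ih =>
    simp only [List.foldl_cons]
    rw [ih, ih (a := [] ++ r)]
    simp

theorem resource_area_foldl (area : List (List String)) (t l : Int) :
    area.foldl (fun (tl : Int × Int) row =>
      row.foldl (fun (tl : Int × Int) e =>
        if e == "|" then (tl.1 + 1, tl.2)
        else if e == "#" then (tl.1, tl.2 + 1)
        else tl) tl) (t, l)
    = (t + ((area.foldl (fun acc row => acc ++ row) []).count "|" : Int),
       l + ((area.foldl (fun acc row => acc ++ row) []).count "#" : Int)) := by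
  induction area generalizing t l with
  | nil => simp
  | cons r rs ih =>
    simp only [List.foldl_cons, resource_row_foldl, ih]
    rw [flat_acc rs ([] ++ r)]
    simp [List.count_append, Prod.ext_iff]
    constructor <;> ring

-- ===== VERDICT (by name: the statement is the Claim_ definition above) =====
theorem resource_spec : Claim_equal_resource := by
  intro area _
  unfold Spec_resource resource resource_alt
  simp only [resource_area_foldl, PySem.List.count_eq]
  ring
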